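-- pv_equiv track=rewrite | github.com/jiankang3053/kangkang | wechat_weather/weather.py | _period_forecast
-- ===== SOURCE A (Python) =====
-- from typing import Any
--
-- WEATHER_CODE_TEXT = {
--     0: "晴",
--     1: "晴间多云",
--     2: "多云",
--     3: "阴",
--     45: "雾",
--     48: "雾凇",
--     51: "小毛毛雨",
--     53: "毛毛雨",
--     55: "浓毛毛雨",
--     56: "冻毛毛雨",
--     57: "强冻毛毛雨",
--     61: "小雨",
--     63: "中雨",
--     65: "大雨",
--     66: "冻雨",
--     67: "强冻雨",
--     71: "小雪",
--     73: "中雪",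
--     75: "大雪",
--     77: "雪粒",
--     80: "小阵雨",
--     81: "阵雨",
--     82: "强阵雨",
--     85: "小阵雪",
--     86: "强阵雪",
--     95: "雷阵雨",
--     96: "雷阵雨伴小冰雹",
--     99: "雷阵雨伴大冰雹",
-- }
--
-- def _weather_code_desc(code: int | float | None) -> str:
--     try:
--         return WEATHER_CODE_TEXT[int(code)]
--     except (KeyError, TypeError, ValueError):
--         return "未知"
--
-- def _period_forecast(day: dict[str, Any], start_hour: int, end_hour: int) -> tuple[str, int]:
--     rows = [
--         row
--         for row in day["hourly_rows"]
--         if start_hour <= row["hour"] < end_hour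
--     ]
--     if not rows:
--         return "未知", 0
--     max_rain = max(int(row["rain"] or 0) for row in rows)
--     wettest = max(rows, key=lambda row: int(row["rain"] or 0))
--     return _weather_code_desc(wettest["code"]), max_rain
-- ===== SOURCE B (Python) =====
-- WEATHER_CODE_TEXT = {
--     0: "晴", 1: "晴间多云", 2: "多云", 3: "阴", 45: "雾", 48: "雾凇",
--     51: "小毛毛雨", 53: "毛毛雨", 55: "浓毛毛雨", 56: "冻毛毛雨", 57: "强冻毛毛雨",
--     61: "小雨", 63: "中雨", 65: "大雨", 66: "冻雨", 67: "强冻雨",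
--     71: "小雪", 73: "中雪", 75: "大雪", 77: "雪粒",
--     80: "小阵雨", 81: "阵雨", 82: "强阵雨", 85: "小阵雪", 86: "强阵雪",
--     95: "雷阵雨", 96: "雷阵雨伴小冰雹", 99: "雷阵雨伴大冰雹",
-- }
--
--
-- def _weather_code_desc(code):
--     try:
--         return WEATHER_CODE_TEXT[int(code)]
--     except (KeyError, TypeError, ValueError):
--         return "未知"
--
--
-- def _period_forecast(day, start_hour, end_hour):
--     # Back-to-front single pass: scanning the rows in REVERSE and replacing the
--     # champion on ties (>=) yields the FIRST maximal in-range row, i.e. exactly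
--     # max()'s tie-break, while building no intermediate list and doing one scan.
--     best = None
--     wettest = None
--     for row in reversed(day["hourly_rows"]):
--         if start_hour <= row["hour"] < end_hour:
--             r = int(row["rain"] or 0)
--             if best is None or r >= best:
--                 best, wettest = r, row
--     if wettest is None:
--         return "未知", 0
--     return _weather_code_desc(wettest["code"]), best
-- ===== Notes on version B (the rewrite author's own statement) =====
-- stated objective: alternative
-- what changed: A filters into an intermediate list and runs two separate max() scans (one for the max rain, one keyed for the wettest row); B makes a single back-to-front pass over day['hourly_rows'] with a (best, wettest) accumulator updated on r >= best, which yields the first-occurrence maximal row without any intermediate list.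
import Mathlib
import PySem

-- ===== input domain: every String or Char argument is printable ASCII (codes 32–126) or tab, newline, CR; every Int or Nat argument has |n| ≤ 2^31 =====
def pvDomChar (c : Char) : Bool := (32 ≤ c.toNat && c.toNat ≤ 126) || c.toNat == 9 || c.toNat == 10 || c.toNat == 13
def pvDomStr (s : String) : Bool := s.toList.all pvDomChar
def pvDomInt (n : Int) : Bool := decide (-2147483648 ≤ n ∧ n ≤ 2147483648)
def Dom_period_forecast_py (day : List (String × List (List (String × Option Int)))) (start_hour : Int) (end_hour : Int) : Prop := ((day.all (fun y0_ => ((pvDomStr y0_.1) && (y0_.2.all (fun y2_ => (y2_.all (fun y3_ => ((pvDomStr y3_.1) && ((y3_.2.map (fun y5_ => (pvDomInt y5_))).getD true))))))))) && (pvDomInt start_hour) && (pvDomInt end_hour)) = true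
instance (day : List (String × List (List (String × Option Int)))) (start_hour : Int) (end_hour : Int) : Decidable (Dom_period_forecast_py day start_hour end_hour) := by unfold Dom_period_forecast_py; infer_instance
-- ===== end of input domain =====

-- B replaces A's filter-plus-two-max()-scans by ONE back-to-front pass keeping a (best, wettest)
-- accumulator (tie update on ≥, which reproduces max()'s first-occurrence tie-break).

-- ===== PORT A =====
def pvCodeTable : List (Int × String) :=
  [(0, "晴"), (1, "晴间多云"), (2, "多云"), (3, "阴"), (45, "雾"), (48, "雾凇"),
   (51, "小毛毛雨"), (53, "毛毛雨"), (55, "浓毛毛雨"), (56, "冻毛毛雨"), (57, "强冻毛毛雨"),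
   (61, "小雨"), (63, "中雨"), (65, "大雨"), (66, "冻雨"), (67, "强冻雨"),
   (71, "小雪"), (73, "中雪"), (75, "大雪"), (77, "雪粒"),
   (80, "小阵雨"), (81, "阵雨"), (82, "强阵雨"), (85, "小阵雪"), (86, "强阵雪"),
   (95, "雷阵雨"), (96, "雷阵雨伴小冰雹"), (99, "雷阵雨伴大冰雹")]

-- _weather_code_desc: int(None) raises TypeError, caught → "未知"; missing table key (KeyError) → "未知"
def pvWeatherCodeDesc (code : Option Int) : String :=
  match code with
  | some c => (pvCodeTable.lookup c).getD "未知"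
  | none => "未知"

-- start_hour <= row["hour"] < end_hour (Python raises on a missing/None "hour"; those inputs are outside Pre_)
def pvInRange (s e : Int) (row : List (String × Option Int)) : Bool :=
  match row.lookup "hour" with
  | some (some h) => decide (s ≤ h) && decide (h < e)
  | _ => false

-- int(row["rain"] or 0): None → 0 (missing key raises in Python; outside Pre_)
def pvRain (row : List (String × Option Int)) : Int :=
  match row.lookup "rain" with
  | some (some v) => v
  | _ => 0

-- _weather_code_desc(row["code"]) (a missing "code" key raises in Python; outside Pre_)
def pvCodeDescOf (row : List (String × Option Int)) : String :=
  match row.lookup "code" with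
  | some c => pvWeatherCodeDesc c
  | none => "未知"

def period_forecast_py (day : List (String × List (List (String × Option Int)))) (start_hour : Int) (end_hour : Int) : String × Int :=
  let rows := ((day.lookup "hourly_rows").getD []).filter (pvInRange start_hour end_hour)
  if rows.isEmpty then ("未知", 0)
  else
    let max_rain := (PySem.List.max? (rows.map pvRain) (fun x => x)).getD 0
    let wettest := (PySem.List.max? rows pvRain).getD []
    (pvCodeDescOf wettest, max_rain)

-- ===== PORT B =====
-- B's _weather_code_desc, dispatched directly on the code value
def pvAltDesc (c : Int) : String :=
  match c with
  | 0 => "晴" | 1 => "晴间多云" | 2 => "多云" | 3 => "阴" | 45 => "雾" | 48 => "雾凇"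
  | 51 => "小毛毛雨" | 53 => "毛毛雨" | 55 => "浓毛毛雨" | 56 => "冻毛毛雨" | 57 => "强冻毛毛雨"
  | 61 => "小雨" | 63 => "中雨" | 65 => "大雨" | 66 => "冻雨" | 67 => "强冻雨"
  | 71 => "小雪" | 73 => "中雪" | 75 => "大雪" | 77 => "雪粒"
  | 80 => "小阵雨" | 81 => "阵雨" | 82 => "强阵雨" | 85 => "小阵雪" | 86 => "强阵雪"
  | 95 => "雷阵雨" | 96 => "雷阵雨伴小冰雹" | 99 => "雷阵雨伴大冰雹"
  | _ => "未知"

-- one iteration of B's loop body over the accumulator (best, wettest); none = nothing kept yet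
-- (a missing/None "hour" makes Python raise, outside Pre_; the r ≥ best update keeps ties)
def pvAltStep (s e : Int) (acc : Option (Int × List (String × Option Int))) (row : List (String × Option Int)) : Option (Int × List (String × Option Int)) :=
  match row.lookup "hour" with
  | some (some h) =>
      if s ≤ h ∧ h < e then
        let r : Int := match row.lookup "rain" with | some (some v) => v | _ => 0
        match acc with
        | none => some (r, row)
        | some (b, _) => if b ≤ r then some (r, row) else acc
      else acc
  | _ => acc

-- 'for row in reversed(day["hourly_rows"])' = a left fold over the reversed list
-- (wettest["code"] missing raises in Python, like A; those inputs are outside Pre_)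
def period_forecast_py_alt (day : List (String × List (List (String × Option Int)))) (start_hour : Int) (end_hour : Int) : String × Int :=
  let hrows := match day.lookup "hourly_rows" with | some l => l | none => []
  match hrows.reverse.foldl (pvAltStep start_hour end_hour) none with
  | none => ("未知", 0)
  | some (b, w) =>
      (match w.lookup "code" with
       | some (some c) => pvAltDesc c
       | _ => "未知", b)

-- ===== PRECONDITION & SPEC =====
-- Pre_ marks EXACTLY where the Python A returns (its raising domain): "hourly_rows" present, every row
-- has a non-None "hour", every in-window row has a "rain" key, and the FIRST in-window row of maximal
-- rain (the one max() picks, whose "code" A reads) has a "code" key — A raises KeyError/TypeError otherwise.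
def Pre_period_forecast_py (day : List (String × List (List (String × Option Int)))) (start_hour : Int) (end_hour : Int) : Prop :=
  let f := ((day.lookup "hourly_rows").getD []).filter (pvInRange start_hour end_hour)
  (day.lookup "hourly_rows").isSome = true ∧
  (∀ row ∈ (day.lookup "hourly_rows").getD [],
    (match row.lookup "hour" with | some (some _) => true | _ => false) = true) ∧
  (∀ row ∈ f, (row.lookup "rain").isSome = true) ∧
  (∀ i ∈ List.range f.length,
    ((∀ j ∈ List.range f.length, pvRain (f.getD j []) ≤ pvRain (f.getD i [])) ∧
     (∀ j ∈ List.range i, pvRain (f.getD j []) < pvRain (f.getD i []))) →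
    ((f.getD i []).lookup "code").isSome = true)
instance (day : List (String × List (List (String × Option Int)))) (start_hour : Int) (end_hour : Int) : Decidable (Pre_period_forecast_py day start_hour end_hour) := by unfold Pre_period_forecast_py; infer_instance

def pvWitness_period_forecast_py : (List (String × List (List (String × Option Int)))) × Int × Int :=
  ([("hourly_rows", [[("hour", some 5), ("rain", some 3), ("code", some 61)],
                     [("hour", some 9), ("rain", none), ("code", some 0)]])], 0, 24)

def Spec_period_forecast_py (day : List (String × List (List (String × Option Int)))) (start_hour : Int) (end_hour : Int) (out : String × Int) : Prop := out = period_forecast_py_alt day start_hour end_hour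
instance (day : List (String × List (List (String × Option Int)))) (start_hour : Int) (end_hour : Int) (out : String × Int) : Decidable (Spec_period_forecast_py day start_hour end_hour out) := by unfold Spec_period_forecast_py; infer_instance

-- ===== CLAIM (what is proved, stated in full; the proofs are below) =====
def Claim_equal_period_forecast_py : Prop := ∀ (day : List (String × List (List (String × Option Int)))) (start_hour : Int) (end_hour : Int), Dom_period_forecast_py day start_hour end_hour → Pre_period_forecast_py day start_hour end_hour → Spec_period_forecast_py day start_hour end_hour (period_forecast_py day start_hour end_hour)

-- ===== LEMMAS AND PROOFS =====

-- the unconditional update of B's loop (what pvAltStep does on a kept row)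
def pvAltUpd (acc : Option (Int × List (String × Option Int))) (row : List (String × Option Int)) : Option (Int × List (String × Option Int)) :=
  match acc with
  | none => some (pvRain row, row)
  | some (b, _) => if b ≤ pvRain row then some (pvRain row, row) else acc

-- first maximal row with its rain, by front recursion (the common reference for both ports)
def pvFirstMax : List (List (String × Option Int)) → Option (Int × List (String × Option Int))
  | [] => none
  | x :: t => pvAltUpd (pvFirstMax t) x

theorem pvAltUpd_ne_none (acc : Option (Int × List (String × Option Int))) (row : List (String × Option Int)) :
    pvAltUpd acc row ≠ none := by
  unfold pvAltUpd
  cases acc with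
  | none => simp
  | some p => obtain ⟨b, m⟩ := p; dsimp only; split <;> simp

theorem pvFirstMax_fst (l : List (List (String × Option Int))) (b : Int) (m : List (String × Option Int))
    (h : pvFirstMax l = some (b, m)) : b = pvRain m := by
  induction l generalizing b m with
  | nil => simp [pvFirstMax] at h
  | cons x t ih =>
      simp only [pvFirstMax] at h
      cases hfm : pvFirstMax t with
      | none =>
          rw [hfm] at h
          simp only [pvAltUpd, Option.some.injEq, Prod.mk.injEq] at h
          obtain ⟨h1, h2⟩ := h
          subst h2; exact h1.symm
      | some p =>
          obtain ⟨pb, pm⟩ := p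
          rw [hfm] at h
          simp only [pvAltUpd] at h
          by_cases hb : pb ≤ pvRain x
          · rw [if_pos hb] at h
            simp only [Option.some.injEq, Prod.mk.injEq] at h
            obtain ⟨h1, h2⟩ := h
            subst h2; exact h1.symm
          · rw [if_neg hb] at h
            simp only [Option.some.injEq, Prod.mk.injEq] at h
            obtain ⟨h1, h2⟩ := h
            subst h1; subst h2
            exact ih _ _ hfm

theorem pvFirstMax_eq_none_iff (l : List (List (String × Option Int))) :
    pvFirstMax l = none ↔ l = [] := by
  cases l with
  | nil => simp [pvFirstMax]
  | cons x t =>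
      simp only [pvFirstMax]
      exact iff_of_false (pvAltUpd_ne_none _ _) (by simp)

-- B's guarded step = filter + unconditional update
theorem pvAltStep_eq (s e : Int) (acc : Option (Int × List (String × Option Int))) (row : List (String × Option Int)) :
    pvAltStep s e acc row = if pvInRange s e row then pvAltUpd acc row else acc := by
  unfold pvAltStep pvInRange pvAltUpd pvRain
  cases row.lookup "hour" with
  | none => rfl
  | some o =>
      cases o with
      | none => rfl
      | some h =>
          dsimp only
          by_cases hc : s ≤ h ∧ h < e
          · rw [if_pos hc]
            have hd : (decide (s ≤ h) && decide (h < e)) = true := by simp [hc.1, hc.2]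
            simp only [hd, if_true]
          · rw [if_neg hc]
            have hd : (decide (s ≤ h) && decide (h < e)) = false := by
              rcases not_and_or.mp hc with h1 | h1 <;> simp [h1]
            simp only [hd]
            simp

-- B's guarded fold over all rows = the unconditional fold over the filtered rows
theorem pv_altfold_filter (s e : Int) (l : List (List (String × Option Int)))
    (acc : Option (Int × List (String × Option Int))) :
    l.foldl (pvAltStep s e) acc = (l.filter (pvInRange s e)).foldl pvAltUpd acc := by
  induction l generalizing acc with
  | nil => rfl
  | cons r t ih =>
      by_cases h : pvInRange s e r = true
      · simp [h, pvAltStep_eq, ih]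
      · simp [h, pvAltStep_eq, ih]

-- folding pvAltUpd back-to-front over a list is pvFirstMax
theorem pv_foldr_upd (l : List (List (String × Option Int))) :
    l.foldr (fun x a => pvAltUpd a x) none = pvFirstMax l := by
  induction l with
  | nil => rfl
  | cons x t ih => simp [List.foldr_cons, ih, pvFirstMax]

-- the step of A's max?(rows, key=rain) fold, named
def pvMaxStep (acc : Option (List (String × Option Int))) (x : List (String × Option Int)) : Option (List (String × Option Int)) :=
  match acc with
  | none => some x
  | some m => if pvRain m < pvRain x then some x else some m

theorem pv_max?_def (l : List (List (String × Option Int))) :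
    PySem.List.max? l pvRain = l.foldl pvMaxStep none := by
  unfold PySem.List.max?
  congr 1
  funext acc x
  cases acc <;> rfl

-- A's running first-max fold, started at m, in terms of pvFirstMax of the remaining rows
theorem pv_maxfold (t : List (List (String × Option Int))) (m : List (String × Option Int)) :
    t.foldl pvMaxStep (some m)
    = some ((pvFirstMax t).elim m (fun p => if pvRain m < p.1 then p.2 else m)) := by
  induction t generalizing m with
  | nil => rfl
  | cons y t ih =>
      simp only [List.foldl_cons, pvMaxStep]
      by_cases hm : pvRain m < pvRain y
      · rw [if_pos hm, ih y]
        cases hfm : pvFirstMax t with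
        | none => simp [pvFirstMax, pvAltUpd, hfm, hm]
        | some p =>
            obtain ⟨pb, pm⟩ := p
            simp only [pvFirstMax, pvAltUpd, hfm]
            by_cases h1 : pb ≤ pvRain y
            · simp [h1, hm, not_lt.mpr h1]
            · have h2 : pvRain y < pb := lt_of_not_ge h1
              simp [h1, h2, lt_trans hm h2]
      · rw [if_neg hm, ih m]
        cases hfm : pvFirstMax t with
        | none => simp [pvFirstMax, pvAltUpd, hfm, hm]
        | some p =>
            obtain ⟨pb, pm⟩ := p
            simp only [pvFirstMax, pvAltUpd, hfm]
            by_cases h1 : pb ≤ pvRain y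
            · have h3 : ¬ pvRain m < pb := fun hlt => hm (lt_of_lt_of_le hlt h1)
              simp [h1, hm, h3]
            · simp [h1]

-- A's max?(rows, key=rain) is the second component of pvFirstMax
theorem pv_max?_eq_fm (l : List (List (String × Option Int))) :
    PySem.List.max? l pvRain = (pvFirstMax l).map Prod.snd := by
  cases l with
  | nil => simp [PySem.List.max?, pvFirstMax]
  | cons x t =>
      rw [pv_max?_def, List.foldl_cons, show pvMaxStep none x = some x from rfl, pv_maxfold t x]
      cases hfm : pvFirstMax t with
      | none => simp [pvFirstMax, pvAltUpd, hfm]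
      | some p =>
          obtain ⟨pb, pm⟩ := p
          simp only [pvFirstMax, pvAltUpd, hfm]
          by_cases h1 : pb ≤ pvRain x
          · simp [h1, not_lt.mpr h1]
          · simp [h1, lt_of_not_ge h1]

-- A's max over the mapped rains is the rain of max?(rows, key=rain)
theorem pv_max_map_id (l : List (List (String × Option Int))) :
    PySem.List.max? (l.map pvRain) (fun x => x) = (PySem.List.max? l pvRain).map pvRain := by
  simp only [PySem.List.max?, List.foldl_map]
  conv_lhs => rw [show (none : Option Int) = Option.map pvRain (none : Option (List (String × Option Int))) from rfl]
  refine List.foldl_hom _ ?_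
  intro a x
  cases a with
  | none => rfl
  | some w => simp only [Option.map_some]; split <;> rfl

-- B's per-code dispatch agrees with A's table lookup
theorem pvAltDesc_eq (c : Int) : pvAltDesc c = pvWeatherCodeDesc (some c) := by
  unfold pvAltDesc pvWeatherCodeDesc pvCodeTable
  split <;> simp_all [List.lookup, beq_eq_decide]

-- ===== VERDICT (by name: the statement is the Claim_ definition above) =====
theorem period_forecast_py_spec : Claim_equal_period_forecast_py := by
  intro day s e _ _
  unfold Spec_period_forecast_py period_forecast_py period_forecast_py_alt
  have hrows : (match day.lookup "hourly_rows" with | some l => l | none => []) =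
      (day.lookup "hourly_rows").getD [] := by cases day.lookup "hourly_rows" <;> rfl
  dsimp only
  rw [hrows, pv_altfold_filter, List.filter_reverse, List.foldl_reverse, pv_foldr_upd]
  cases hfm : pvFirstMax (((day.lookup "hourly_rows").getD []).filter (pvInRange s e)) with
  | none =>
      have h0 := (pvFirstMax_eq_none_iff _).mp hfm
      simp [h0]
  | some p =>
      obtain ⟨b, w⟩ := p
      have hb := pvFirstMax_fst _ b w hfm
      have hne : (((day.lookup "hourly_rows").getD []).filter (pvInRange s e)) ≠ [] := by
        intro h0; rw [h0] at hfm; simp [pvFirstMax] at hfm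
      rw [pv_max_map_id, pv_max?_eq_fm, hfm]
      simp only [List.isEmpty_iff, hne, Option.map_some, Option.getD_some]
      unfold pvCodeDescOf
      cases w.lookup "code" with
      | none => simp [hb]
      | some oc =>
          cases oc with
          | none => simp [pvWeatherCodeDesc, hb]
          | some c => simp [← pvAltDesc_eq, hb]
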